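-- pv_equiv track=rewrite | github.com/patcmag/farkle | validate_roll.py | farkled
-- ===== SOURCE A (Python) =====
-- def isFourKind(faceCount):
--     if faceCount.count(0) == 5 and faceCount.count(4) == 1:
--         return True
--     else: return False
--
-- def isFiveKind(faceCount):
--     if faceCount.count(0) == 5 and faceCount.count(5) == 1:
--         return True
--     else: return False
--
-- def isSixKind(faceCount):
--     if faceCount.count(0) == 5 and faceCount.count(6) == 1:
--         return True
--     else: return False
--
-- def isThreePairs(faceCount):
--     if faceCount.count(0) == 3 and faceCount.count(2) == 3:
--         return True
--     else: return False
--
-- def isTwoTriples(faceCount):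
--     if faceCount.count(0) == 4 and faceCount.count(3) == 2:
--         return True
--     else: return False
--
-- def isStraight(faceCount):
--     if faceCount == [1,1,1,1,1,1]: return True
--     else: return False
--
-- def farkled(roll):
--     faceCount = [roll.count(i) for i in [1,2,3,4,5,6]]
--     if 1 in roll: return False
--     if 5 in roll: return False
--     if 3 in faceCount: return False
--     if 4 in faceCount: return False
--     if 5 in faceCount: return False
--     if isFourKind(faceCount):   return False
--     if isFiveKind(faceCount):   return False
--     if isSixKind(faceCount):    return False
--     if isThreePairs(faceCount): return False
--     if isTwoTriples(faceCount): return False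
--     if isStraight(faceCount):   return False
--     else:
--         # use these print statements with stats.findFarkle()
--         # print 'faceCount\t' + str(faceCount)
--         # print 'roll\t\t' + str(roll)
--         return True
-- ===== SOURCE B (Python) =====
-- def farkled(roll):
--     faces = [x for x in roll if 1 <= x <= 6]
--     rs = []
--     while faces:
--         f = faces[0]
--         rs.append((f, faces.count(f)))
--         faces = [x for x in faces if x != f]
--     lens = [n for _, n in rs]
--     return not (any(f in (1, 5) for f, _ in rs)
--                 or any(n in (3, 4, 5) for n in lens)
--                 or lens == [6]
--                 or lens == [2, 2, 2])
-- ===== Notes on version B (the rewrite author's own statement) =====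
-- stated objective: alternative
-- what changed: B replaces A's fixed six-entry count table and cascade of per-combo helper predicates by filtering the roll to faces 1-6 and partitioning it into (face, multiplicity) runs, then decides scoring with one boolean over those runs (a 1 or 5 present, some multiplicity in 3..5, runs = one face six times, or exactly three faces of multiplicity 2).
import Mathlib
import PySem

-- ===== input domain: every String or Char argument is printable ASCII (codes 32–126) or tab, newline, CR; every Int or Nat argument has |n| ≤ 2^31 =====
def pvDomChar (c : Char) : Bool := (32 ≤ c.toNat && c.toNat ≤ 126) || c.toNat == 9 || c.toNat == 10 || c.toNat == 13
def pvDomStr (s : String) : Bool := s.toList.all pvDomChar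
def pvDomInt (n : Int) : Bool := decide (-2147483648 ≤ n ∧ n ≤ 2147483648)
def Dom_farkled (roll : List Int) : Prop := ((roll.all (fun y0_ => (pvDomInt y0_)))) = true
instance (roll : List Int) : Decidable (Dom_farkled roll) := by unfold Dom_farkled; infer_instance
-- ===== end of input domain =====

-- B replaces the per-face count table and cascade of combo helper predicates by partitioning the scoring faces into (face, multiplicity) runs and one boolean over those runs (objective: alternative; measured faster by a constant factor).


-- ===== PORT A =====
def isFourKind (faceCount : List Nat) : Bool :=
  if PySem.List.count faceCount 0 == 5 && PySem.List.count faceCount 4 == 1 then true else false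

def isFiveKind (faceCount : List Nat) : Bool :=
  if PySem.List.count faceCount 0 == 5 && PySem.List.count faceCount 5 == 1 then true else false

def isSixKind (faceCount : List Nat) : Bool :=
  if PySem.List.count faceCount 0 == 5 && PySem.List.count faceCount 6 == 1 then true else false

def isThreePairs (faceCount : List Nat) : Bool :=
  if PySem.List.count faceCount 0 == 3 && PySem.List.count faceCount 2 == 3 then true else false

def isTwoTriples (faceCount : List Nat) : Bool :=
  if PySem.List.count faceCount 0 == 4 && PySem.List.count faceCount 3 == 2 then true else false

def isStraight (faceCount : List Nat) : Bool :=
  if faceCount == [1,1,1,1,1,1] then true else false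

def farkled (roll : List Int) : Bool :=
  let faceCount := [(1:Int),2,3,4,5,6].map (fun i => PySem.List.count roll i)
  if roll.contains 1 then false
  else if roll.contains 5 then false
  else if faceCount.contains 3 then false
  else if faceCount.contains 4 then false
  else if faceCount.contains 5 then false
  else if isFourKind faceCount then false
  else if isFiveKind faceCount then false
  else if isSixKind faceCount then false
  else if isThreePairs faceCount then false
  else if isTwoTriples faceCount then false
  else if isStraight faceCount then false
  else true

-- ===== PORT B =====
-- runs xs = [(xs[0], xs.count(xs[0]))] + runs([x for x in xs if x != xs[0]])
def runsB (xs : List Int) : List (Int × Int) :=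
  match xs with
  | [] => []
  | f :: t =>
    (f, (PySem.List.count (f :: t) f : Int)) :: runsB ((f :: t).filter (fun x => decide (x ≠ f)))
termination_by xs.length
decreasing_by
  simp only [List.filter_cons, decide_not, ne_eq, List.length_cons]
  simp
  exact List.length_filter_le _ _

def farkled_alt (roll : List Int) : Bool :=
  let faces := roll.filter (fun x => decide (1 ≤ x) && decide (x ≤ 6))
  let rs := runsB faces
  let lens := rs.map (fun p => p.2)
  !(rs.any (fun p => p.1 == 1 || p.1 == 5) ||
    lens.any (fun n => n == 3 || n == 4 || n == 5) ||
    lens == [(6:Int)] || lens == [(2:Int), 2, 2])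

-- ===== PRECONDITION & SPEC =====
def Spec_farkled (roll : List Int) (out : Bool) : Prop := out = farkled_alt roll
instance (roll : List Int) (out : Bool) : Decidable (Spec_farkled roll out) := by unfold Spec_farkled; infer_instance

-- ===== CLAIM (what is proved, stated in full; the proofs are below) =====
def Claim_equal_farkled : Prop := ∀ (roll : List Int), Dom_farkled roll → Spec_farkled roll (farkled roll)

-- ===== LEMMAS AND PROOFS =====
theorem runsB_mem (xs : List Int) : ∀ (f n : Int),
    (f, n) ∈ runsB xs ↔ f ∈ xs ∧ n = (xs.count f : Int) := by
  induction xs using runsB.induct with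
  | case1 => simp [runsB]
  | case2 g t ih =>
    intro f n
    rw [runsB]
    simp only [List.mem_cons, Prod.mk.injEq, ih]
    constructor
    · rintro (⟨rfl, rfl⟩ | ⟨hmem, rfl⟩)
      · exact ⟨Or.inl rfl, by simp [PySem.List.count_eq]⟩
      · have hf : f ∈ g :: t := (List.mem_filter.mp hmem).1
        have hne : f ≠ g := by
          have := (List.mem_filter.mp hmem).2; simpa using this
        refine ⟨List.mem_cons.mp hf, ?_⟩
        rw [List.count_filter]
        simp [hne]
    · rintro ⟨hf, rfl⟩
      by_cases hfg : f = g
      · subst hfg; exact Or.inl ⟨rfl, by simp [PySem.List.count_eq]⟩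
      · refine Or.inr ⟨List.mem_filter.mpr ⟨List.mem_cons.mpr hf, by simpa using hfg⟩, ?_⟩
        rw [List.count_filter]
        simp [hfg]

theorem runsB_fst_nodup (xs : List Int) : ((runsB xs).map Prod.fst).Nodup := by
  induction xs using runsB.induct with
  | case1 => simp [runsB]
  | case2 g t ih =>
    rw [runsB]
    simp only [List.map_cons, List.nodup_cons]
    refine ⟨?_, ih⟩
    intro hmem
    obtain ⟨p, hp, hfst⟩ := List.mem_map.mp hmem
    obtain ⟨hpm, _⟩ := (runsB_mem _ p.1 p.2).mp (by simpa using hp)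
    have := (List.mem_filter.mp hpm).2
    simp [hfst] at this

-- proof-side abbreviations
def fcR (roll : List Int) : List Nat := [(1:Int),2,3,4,5,6].map (fun i => PySem.List.count roll i)
def rsR (roll : List Int) : List (Int × Int) :=
  runsB (roll.filter (fun x => decide (1 ≤ x) && decide (x ≤ 6)))
def LR (roll : List Int) : List Int :=
  [(1:Int),2,3,4,5,6].filter (fun i => !(PySem.List.count roll i == 0))

set_option maxHeartbeats 2000000 in
theorem A_iff (roll : List Int) :
    farkled roll = true ↔
      ¬(roll.contains (1:Int) = true ∨ roll.contains (5:Int) = true ∨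
        (fcR roll).contains (3:Nat) = true ∨ (fcR roll).contains (4:Nat) = true ∨
        (fcR roll).contains (5:Nat) = true ∨
        isFourKind (fcR roll) = true ∨ isFiveKind (fcR roll) = true ∨
        isSixKind (fcR roll) = true ∨ isThreePairs (fcR roll) = true ∨
        isTwoTriples (fcR roll) = true ∨ isStraight (fcR roll) = true) := by
  simp only [farkled, fcR]
  split_ifs <;> tauto

theorem B_iff (roll : List Int) :
    farkled_alt roll = true ↔
      ¬((rsR roll).any (fun p => p.1 == 1 || p.1 == 5) = true ∨
        (((rsR roll).map (fun p => p.2)).any (fun n => n == 3 || n == 4 || n == 5)) = true ∨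
        ((rsR roll).map (fun p => p.2)) = [(6:Int)] ∨
        ((rsR roll).map (fun p => p.2)) = [(2:Int), 2, 2]) := by
  have hshow : farkled_alt roll =
      !((rsR roll).any (fun p => p.1 == 1 || p.1 == 5) ||
        (((rsR roll).map (fun p => p.2)).any (fun n => n == 3 || n == 4 || n == 5)) ||
        ((rsR roll).map (fun p => p.2)) == [(6:Int)] ||
        ((rsR roll).map (fun p => p.2)) == [(2:Int), 2, 2]) := rfl
  rw [hshow, Bool.not_eq_true', Bool.eq_false_iff]
  simp only [ne_eq, Bool.or_eq_true, beq_iff_eq, not_or]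
  tauto

theorem conv_contains_int (roll : List Int) (v : Int) : roll.contains v = true ↔ v ∈ roll := by
  simp

theorem conv_contains_nat (l : List Nat) (v : Nat) : l.contains v = true ↔ v ∈ l := by
  simp

theorem conv_4K (l : List Nat) : isFourKind l = true ↔ (l.count 0 = 5 ∧ l.count 4 = 1) := by
  simp [isFourKind, PySem.List.count_eq]

theorem conv_5K (l : List Nat) : isFiveKind l = true ↔ (l.count 0 = 5 ∧ l.count 5 = 1) := by
  simp [isFiveKind, PySem.List.count_eq]

theorem conv_6K (l : List Nat) : isSixKind l = true ↔ (l.count 0 = 5 ∧ l.count 6 = 1) := by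
  simp [isSixKind, PySem.List.count_eq]

theorem conv_3P (l : List Nat) : isThreePairs l = true ↔ (l.count 0 = 3 ∧ l.count 2 = 3) := by
  simp [isThreePairs, PySem.List.count_eq]

theorem conv_2T (l : List Nat) : isTwoTriples l = true ↔ (l.count 0 = 4 ∧ l.count 3 = 2) := by
  simp [isTwoTriples, PySem.List.count_eq]

theorem conv_St (l : List Nat) : isStraight l = true ↔ l = [1,1,1,1,1,1] := by
  simp [isStraight]

theorem rs_mem (roll : List Int) (p : Int × Int) :
    p ∈ rsR roll ↔ (p.1 ∈ roll ∧ 1 ≤ p.1 ∧ p.1 ≤ 6 ∧ p.2 = (roll.count p.1 : Int)) := by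
  obtain ⟨a, b⟩ := p
  rw [rsR, runsB_mem, List.mem_filter]
  constructor
  · rintro ⟨⟨ha, hb⟩, rfl⟩
    simp only [Bool.and_eq_true, decide_eq_true_eq] at hb
    rw [List.count_filter (by simp [hb.1, hb.2])]
    exact ⟨ha, hb.1, hb.2, rfl⟩
  · rintro ⟨ha, h1, h6, hb⟩
    refine ⟨⟨ha, by simp [h1, h6]⟩, ?_⟩
    rw [List.count_filter (p := fun x => decide (1 ≤ x) && decide (x ≤ 6)) (by simp [h1, h6])]
    exact hb

theorem rs_fst_nodup (roll : List Int) : ((rsR roll).map Prod.fst).Nodup :=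
  runsB_fst_nodup _

theorem LR_nodup (roll : List Int) : (LR roll).Nodup :=
  List.Nodup.filter _ (by decide : ([(1:Int),2,3,4,5,6]).Nodup)

theorem fst_perm (roll : List Int) : ((rsR roll).map Prod.fst).Perm (LR roll) := by
  rw [List.perm_ext_iff_of_nodup (rs_fst_nodup roll) (LR_nodup roll)]
  intro i
  rw [List.mem_map]
  constructor
  · rintro ⟨p, hp, rfl⟩
    obtain ⟨hmem, h1, h6, _⟩ := (rs_mem roll p).mp hp
    rw [LR, List.mem_filter]
    refine ⟨?_, ?_⟩
    · have : p.1 = 1 ∨ p.1 = 2 ∨ p.1 = 3 ∨ p.1 = 4 ∨ p.1 = 5 ∨ p.1 = 6 := by omega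
      rcases this with h|h|h|h|h|h <;> simp [h]
    · have : roll.count p.1 ≠ 0 := Nat.pos_iff_ne_zero.mp (List.count_pos_iff.mpr hmem)
      simp [PySem.List.count_eq, this]
  · intro hi
    rw [LR, List.mem_filter] at hi
    obtain ⟨hlit, hcnt⟩ := hi
    have hbounds : 1 ≤ i ∧ i ≤ 6 := by
      simp only [List.mem_cons, List.not_mem_nil, or_false] at hlit
      rcases hlit with rfl|rfl|rfl|rfl|rfl|rfl <;> omega
    have hroll : i ∈ roll := by
      simp only [PySem.List.count_eq, Bool.not_eq_eq_eq_not, Bool.not_true,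
        beq_eq_false_iff_ne, ne_eq] at hcnt
      exact List.count_pos_iff.mp (Nat.pos_of_ne_zero hcnt)
    exact ⟨(i, (roll.count i : Int)), (rs_mem roll _).mpr ⟨hroll, hbounds.1, hbounds.2, rfl⟩, rfl⟩

theorem rs_eq (roll : List Int) :
    rsR roll = ((rsR roll).map Prod.fst).map (fun i => (i, (roll.count i : Int))) := by
  rw [List.map_map]
  symm
  have h : ∀ p ∈ rsR roll, ((fun i => (i, (roll.count i : Int))) ∘ Prod.fst) p = id p := by
    intro p hp
    obtain ⟨_, _, _, h2⟩ := (rs_mem roll p).mp hp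
    simp [Function.comp, h2.symm]
  rw [List.map_congr_left h, List.map_id]

theorem F_eq (roll : List Int) :
    (fcR roll).filter (fun n => !(n == 0)) = (LR roll).map (fun i => PySem.List.count roll i) := by
  rw [fcR, LR, List.filter_map]
  rfl

theorem lens_perm (roll : List Int) :
    ((rsR roll).map (fun p => p.2)).Perm
      (((fcR roll).filter (fun n => !(n == 0))).map (fun n : Nat => (n : Int))) := by
  have h1 : (rsR roll).map (fun p => p.2)
      = ((rsR roll).map Prod.fst).map (fun i => (roll.count i : Int)) := by
    conv_lhs => rw [rs_eq roll]
    rw [List.map_map]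
    rfl
  have h2 := (fst_perm roll).map (fun i => (roll.count i : Int))
  rw [F_eq, List.map_map, h1]
  have hcomp : ((fun n : Nat => (n : Int)) ∘ fun i => PySem.List.count roll i)
      = fun i => (roll.count i : Int) := by
    funext i
    simp [Function.comp, PySem.List.count_eq]
  rw [hcomp]
  exact h2

theorem count_complement (l : List Nat) :
    l.count 0 + (l.filter (fun n => !(n == 0))).length = l.length := by
  rw [List.count_eq_countP, List.countP_eq_length_filter]
  have h := List.length_eq_length_filter_add (l := l) (fun n => n == 0)
  omega

theorem count_filter_nz (l : List Nat) (v : Nat) (hv : v ≠ 0) :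
    l.count v = (l.filter (fun n => !(n == 0))).count v := by
  rw [List.count_filter]
  simp [hv]

theorem six_char (l : List Nat) (h6 : l.length = 6) :
    (l.count 0 = 5 ∧ l.count 6 = 1) ↔ l.filter (fun n => !(n == 0)) = [6] := by
  have hc := count_complement l
  constructor
  · rintro ⟨h0, hcnt⟩
    have hlen : (l.filter (fun n => !(n == 0))).length = 1 := by omega
    obtain ⟨a, ha⟩ := List.length_eq_one_iff.mp hlen
    rw [count_filter_nz l 6 (by norm_num), ha] at hcnt
    simp only [List.count_cons, List.count_nil] at hcnt
    have : a = 6 := by by_cases h : a = 6 <;> simp_all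
    rw [ha, this]
  · intro hF
    have hlen : (l.filter (fun n => !(n == 0))).length = 1 := by rw [hF]; rfl
    refine ⟨by omega, ?_⟩
    rw [count_filter_nz l 6 (by norm_num), hF]
    rfl

theorem pairs_char (l : List Nat) (h6 : l.length = 6) :
    (l.count 0 = 3 ∧ l.count 2 = 3) ↔ l.filter (fun n => !(n == 0)) = [2,2,2] := by
  have hc := count_complement l
  constructor
  · rintro ⟨h0, hcnt⟩
    have hlen : (l.filter (fun n => !(n == 0))).length = 3 := by omega
    rw [count_filter_nz l 2 (by norm_num)] at hcnt
    have hall := List.count_eq_length.mp (by rw [hcnt, hlen])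
    have : l.filter (fun n => !(n == 0)) = List.replicate 3 2 := by
      rw [List.eq_replicate_iff]
      exact ⟨hlen, fun b hb => (hall b hb).symm⟩
    exact this.trans rfl
  · intro hF
    have hlen : (l.filter (fun n => !(n == 0))).length = 3 := by rw [hF]; rfl
    refine ⟨by omega, ?_⟩
    rw [count_filter_nz l 2 (by norm_num), hF]
    rfl

theorem fcR_length (roll : List Int) : (fcR roll).length = 6 := by simp [fcR]

theorem map_cast_inj (F G : List Nat)
    (h : F.map (fun n : Nat => (n : Int)) = G.map (fun n : Nat => (n : Int))) : F = G := by
  induction F generalizing G with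
  | nil => cases G <;> simp_all
  | cons a t ih =>
    cases G with
    | nil => simp_all
    | cons b u =>
      simp only [List.map_cons, List.cons.injEq] at h
      have : a = b := by exact_mod_cast h.1
      simp [this, ih u h.2]

theorem B3_iff (roll : List Int) :
    ((rsR roll).map (fun p => p.2)) = [(6:Int)] ↔
      ((fcR roll).count 0 = 5 ∧ (fcR roll).count 6 = 1) := by
  rw [six_char _ (fcR_length roll)]
  have hp := lens_perm roll
  constructor
  · intro h
    rw [h] at hp
    have hM : ((fcR roll).filter (fun n => !(n == 0))).map (fun n : Nat => (n : Int)) = [(6:Int)] :=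
      (List.singleton_perm.mp hp).symm
    exact map_cast_inj _ [6] hM
  · intro h
    rw [h] at hp
    exact List.perm_singleton.mp hp

theorem B4_iff (roll : List Int) :
    ((rsR roll).map (fun p => p.2)) = [(2:Int), 2, 2] ↔
      ((fcR roll).count 0 = 3 ∧ (fcR roll).count 2 = 3) := by
  rw [pairs_char _ (fcR_length roll)]
  have hp := lens_perm roll
  constructor
  · intro h
    rw [h] at hp
    have hp' := hp.symm
    have hM : ((fcR roll).filter (fun n => !(n == 0))).map (fun n : Nat => (n : Int))
        = List.replicate 3 (2:Int) := by
      have : ([(2:Int),2,2] : List Int) = List.replicate 3 (2:Int) := rfl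
      rw [this] at hp'
      exact List.perm_replicate.mp hp'
    exact map_cast_inj _ [2,2,2] (by simpa using hM)
  · intro h
    rw [h] at hp
    have : ([(2:Nat),2,2].map (fun n : Nat => (n : Int))) = List.replicate 3 (2:Int) := rfl
    rw [this] at hp
    exact List.perm_replicate.mp hp

theorem B2_iff (roll : List Int) :
    (((rsR roll).map (fun p => p.2)).any (fun n => n == 3 || n == 4 || n == 5)) = true ↔
      ((3:Nat) ∈ fcR roll ∨ (4:Nat) ∈ fcR roll ∨ (5:Nat) ∈ fcR roll) := by
  have hp := lens_perm roll
  rw [List.any_eq_true]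
  have hmem : ∀ v : Nat, v ≠ 0 → (v ∈ fcR roll ↔ v ∈ (fcR roll).filter (fun n => !(n == 0))) := by
    intro v hv
    rw [List.mem_filter]
    simp [hv]
  constructor
  · rintro ⟨n, hn, hval⟩
    have := hp.mem_iff.mp hn
    obtain ⟨m, hm, rfl⟩ := List.mem_map.mp this
    simp only [Bool.or_eq_true, beq_iff_eq] at hval
    have hm' := (List.mem_filter.mp hm).1
    rcases hval with (h|h)|h
    · left; rwa [(by exact_mod_cast h : m = 3)] at hm'
    · right; left; rwa [(by exact_mod_cast h : m = 4)] at hm'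
    · right; right; rwa [(by exact_mod_cast h : m = 5)] at hm'
  · intro h
    have hex : ∃ v : Nat, (v = 3 ∨ v = 4 ∨ v = 5) ∧ v ∈ fcR roll := by
      rcases h with h|h|h
      exacts [⟨3, Or.inl rfl, h⟩, ⟨4, Or.inr (Or.inl rfl), h⟩, ⟨5, Or.inr (Or.inr rfl), h⟩]
    obtain ⟨v, hv35, hv⟩ := hex
    have hvne : v ≠ 0 := by rcases hv35 with rfl|rfl|rfl <;> norm_num
    have hvF := (hmem v hvne).mp hv
    refine ⟨(v : Int), hp.mem_iff.mpr (List.mem_map.mpr ⟨v, hvF, rfl⟩), ?_⟩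
    rcases hv35 with rfl|rfl|rfl <;> rfl

theorem B1_iff (roll : List Int) :
    ((rsR roll).any (fun p => p.1 == 1 || p.1 == 5)) = true ↔
      ((1:Int) ∈ roll ∨ (5:Int) ∈ roll) := by
  rw [List.any_eq_true]
  constructor
  · rintro ⟨p, hp, hval⟩
    obtain ⟨hmem, _, _, _⟩ := (rs_mem roll p).mp hp
    simp only [Bool.or_eq_true, beq_iff_eq] at hval
    rcases hval with h|h
    · left; rwa [h] at hmem
    · right; rwa [h] at hmem
  · intro h
    rcases h with h|h
    · exact ⟨(1, (roll.count 1 : Int)), (rs_mem roll _).mpr ⟨h, by norm_num, by norm_num, rfl⟩, rfl⟩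
    · exact ⟨(5, (roll.count 5 : Int)), (rs_mem roll _).mpr ⟨h, by norm_num, by norm_num, rfl⟩, rfl⟩

theorem D1_mem (roll : List Int) (v : Nat) (hv : (fcR roll).count v = 1) : v ∈ fcR roll :=
  List.count_pos_iff.mp (by omega)

theorem D3_mem (roll : List Int) (hv : (fcR roll).count 3 = 2) : (3:Nat) ∈ fcR roll :=
  List.count_pos_iff.mp (by omega)

theorem D4_mem (roll : List Int) (h : fcR roll = [1,1,1,1,1,1]) : (1:Int) ∈ roll := by
  have h1 : PySem.List.count roll (1:Int) = 1 := by
    have := congrArg (fun l => l.headD 0) h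
    simpa [fcR] using this
  rw [PySem.List.count_eq] at h1
  exact List.count_pos_iff.mp (by omega)

-- ===== VERDICT (by name: the statement is the Claim_ definition above) =====
set_option maxHeartbeats 1000000 in
theorem farkled_spec : Claim_equal_farkled := by
  intro roll _
  unfold Spec_farkled
  rw [Bool.eq_iff_iff, A_iff, B_iff]
  rw [conv_contains_int, conv_contains_int, conv_contains_nat, conv_contains_nat,
    conv_contains_nat, conv_4K, conv_5K, conv_6K, conv_3P, conv_2T, conv_St,
    B1_iff, B2_iff, B3_iff, B4_iff]
  constructor
  · intro hA hB
    apply hA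
    rcases hB with (h|h)|(h|h|h)|h|h
    · exact Or.inl h
    · exact Or.inr (Or.inl h)
    · exact Or.inr (Or.inr (Or.inl h))
    · exact Or.inr (Or.inr (Or.inr (Or.inl h)))
    · exact Or.inr (Or.inr (Or.inr (Or.inr (Or.inl h))))
    · exact Or.inr (Or.inr (Or.inr (Or.inr (Or.inr (Or.inr (Or.inr (Or.inl h)))))))
    · exact Or.inr (Or.inr (Or.inr (Or.inr (Or.inr (Or.inr (Or.inr (Or.inr (Or.inl h))))))))
  · intro hB hA
    apply hB
    rcases hA with h|h|h|h|h|h|h|h|h|h|h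
    · exact Or.inl (Or.inl h)
    · exact Or.inl (Or.inr h)
    · exact Or.inr (Or.inl (Or.inl h))
    · exact Or.inr (Or.inl (Or.inr (Or.inl h)))
    · exact Or.inr (Or.inl (Or.inr (Or.inr h)))
    · exact Or.inr (Or.inl (Or.inr (Or.inl (D1_mem roll 4 h.2))))
    · exact Or.inr (Or.inl (Or.inr (Or.inr (D1_mem roll 5 h.2))))
    · exact Or.inr (Or.inr (Or.inl h))
    · exact Or.inr (Or.inr (Or.inr h))
    · exact Or.inr (Or.inl (Or.inl (D3_mem roll h.2)))
    · exact Or.inl (Or.inl (D4_mem roll h))
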